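-- pv_equiv track=rewrite | github.com/242lee/TIL | 240210/SWEA-0206Typing.py | typing
-- ===== SOURCE A (Python) =====
-- def typing(str1, str2):
--     N = len(str1)
--     M = len(str2)
--     result = N
--     i = 0
--
--     while i <= N-M:
--         cnt = 0
--         for k in range(M):
--             if str1[i+k] == str2[k]:
--                 cnt += 1
--         if cnt == M:
--             result = result - M +1
--             # str1 안에 str2를 발견하면 그만큼 건너뛰어서 다시 시작
--             i += M
--         else:
--             i += 1
--     return result
-- ===== SOURCE B (Python) =====
-- def typing(str1, str2):
--     N = len(str1)
--     M = len(str2)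
--     # pass 1: every occurrence position of str2 in str1 (overlapping ones included)
--     occ = [i for i in range(N - M + 1) if str1[i:i+M] == str2]
--     # pass 2: greedy selection of non-overlapping occurrences
--     taken = 0
--     nxt = 0
--     for p in occ:
--         if p >= nxt:
--             taken += 1
--             nxt = p + M
--     # each selected occurrence is typed as one keystroke instead of M
--     return N - taken * (M - 1)
-- ===== Notes on version B (the rewrite author's own statement) =====
-- stated objective: faster
-- what changed: B replaces A's single fused loop (which skips M positions after each match, so never even examines positions inside a match) by three staged passes: build the list of ALL occurrence positions of str2 (overlapping included) via slice comparison, then a separate greedy fold selecting non-overlapping positions, then the closed form N - taken*(M-1).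
import Mathlib
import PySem

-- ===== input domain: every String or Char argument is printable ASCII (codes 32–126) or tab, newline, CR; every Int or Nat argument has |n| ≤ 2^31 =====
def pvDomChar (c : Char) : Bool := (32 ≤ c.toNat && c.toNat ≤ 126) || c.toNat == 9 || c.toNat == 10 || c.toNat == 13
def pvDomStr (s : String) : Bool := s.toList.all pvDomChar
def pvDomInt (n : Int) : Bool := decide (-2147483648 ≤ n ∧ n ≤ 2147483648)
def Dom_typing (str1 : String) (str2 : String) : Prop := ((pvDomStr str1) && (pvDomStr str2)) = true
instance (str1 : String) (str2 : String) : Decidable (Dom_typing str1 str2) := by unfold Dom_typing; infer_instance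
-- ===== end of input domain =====

-- B replaces A's fused scan-and-skip loop by staged passes: list ALL occurrence positions
-- (overlapping included) via slice comparison, then a separate greedy fold selecting
-- non-overlapping ones, then the closed form N - taken*(M-1). Return value only.

-- ===== PORT A =====
/-- A's while-loop. The fuel argument is a totality guard only: whenever `s2 ≠ []` the loop
    advances `i` by at least 1 per iteration and runs at most `N+1` times; `str2 = ""` (where
    Python A loops forever) is excluded by `Pre_typing`. Python's `str1[i+k] == str2[k]` is
    ported as equality of `pyGet?` options — exact, since both indices are in range whenever
    the comparison is reached (`0 ≤ i ≤ N-M`, `0 ≤ k < M`). -/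
def typingLoop (s1 s2 : List Char) (N M : Int) : Nat → Int → Int → Int
  | 0, _, result => result
  | fuel+1, i, result =>
    if i ≤ N - M then
      let cnt : Int := (PySem.List.pyRange 0 M 1).foldl
        (fun cnt k => if PySem.List.pyGet? s1 (i + k) == PySem.List.pyGet? s2 k then cnt + 1 else cnt) 0
      if cnt = M then
        typingLoop s1 s2 N M fuel (i + M) (result - M + 1)
      else
        typingLoop s1 s2 N M fuel (i + 1) result
    else result

def typing (str1 : String) (str2 : String) : Int :=
  let s1 := str1.toList
  let s2 := str2.toList
  let N : Int := PySem.Chars.len s1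
  let M : Int := PySem.Chars.len s2
  typingLoop s1 s2 N M (s1.length + 1) 0 N

-- ===== PORT B =====
/-- Body of B's greedy selection loop: `if p >= nxt: taken += 1; nxt = p + M`
    on the state `(taken, nxt)`. -/
def typingAltStep (M : Int) (st : Int × Int) (p : Int) : Int × Int :=
  if st.2 ≤ p then (st.1 + 1, p + M) else st

def typing_alt (str1 : String) (str2 : String) : Int :=
  let s1 := str1.toList
  let s2 := str2.toList
  let N : Int := PySem.Chars.len s1
  let M : Int := PySem.Chars.len s2
  -- pass 1: [i for i in range(N - M + 1) if str1[i:i+M] == str2]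
  let occ := (PySem.List.pyRange 0 (N - M + 1) 1).filter
      (fun i => PySem.List.slice s1 (some i) (some (i + M)) == s2)
  -- pass 2: greedy selection of non-overlapping occurrences
  let st := occ.foldl (typingAltStep M) (0, 0)
  N - st.1 * (M - 1)

-- ===== PRECONDITION & SPEC =====
-- Pre_ excludes only str2 = "": there Python A's while-loop never advances i and diverges
-- (it returns on every other input).
def Pre_typing (str1 : String) (str2 : String) : Prop := str2 ≠ ""
instance (str1 : String) (str2 : String) : Decidable (Pre_typing str1 str2) := by unfold Pre_typing; infer_instance
def pvWitness_typing : String × String := ("ababab", "ab")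

def Spec_typing (str1 : String) (str2 : String) (out : Int) : Prop := out = typing_alt str1 str2
instance (str1 : String) (str2 : String) (out : Int) : Decidable (Spec_typing str1 str2 out) := by unfold Spec_typing; infer_instance

-- ===== CLAIM =====
def Claim_equal_typing : Prop := ∀ (str1 : String) (str2 : String), Dom_typing str1 str2 → Pre_typing str1 str2 → Spec_typing str1 str2 (typing str1 str2)

-- ===== LEMMAS AND PROOFS =====

/-- A's inner counting loop reaches `M` exactly when `s2` occurs at position `i`. -/
theorem cnt_eq_iff (s1 s2 : List Char) (i : Nat) (hle : i + s2.length ≤ s1.length) :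
    ((PySem.List.pyRange 0 (s2.length : Int) 1).foldl
        (fun cnt k => if PySem.List.pyGet? s1 ((i : Int) + k) == PySem.List.pyGet? s2 k then cnt + 1 else cnt)
        (0 : Int) = (s2.length : Int))
      ↔ s2 <+: s1.drop i := by
  rw [PySem.List.foldl_count_if
    (fun k => PySem.List.pyGet? s1 ((i : Int) + k) == PySem.List.pyGet? s2 k)]
  have hlen : (PySem.List.pyRange 0 (s2.length : Int) 1).length = s2.length := by
    rw [PySem.List.length_pyRange_one]; omega
  have hcle := List.countP_le_length
    (p := fun k => PySem.List.pyGet? s1 ((i : Int) + k) == PySem.List.pyGet? s2 k)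
    (l := PySem.List.pyRange 0 (s2.length : Int) 1)
  rw [hlen] at hcle
  constructor
  · intro hcnt
    have hcp : (PySem.List.pyRange 0 (s2.length : Int) 1).countP
        (fun k => PySem.List.pyGet? s1 ((i : Int) + k) == PySem.List.pyGet? s2 k)
        = (PySem.List.pyRange 0 (s2.length : Int) 1).length := by
      rw [hlen]; omega
    have hall := List.countP_eq_length.mp hcp
    rw [List.prefix_iff_getElem?]
    intro j hj
    have hmem : ((j : Int)) ∈ PySem.List.pyRange 0 (s2.length : Int) 1 :=
      PySem.List.mem_pyRange_one.mpr ⟨by positivity, by exact_mod_cast hj⟩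
    have := hall _ hmem
    simp only [beq_iff_eq] at this
    have hcast : ((i : Int) + (j : Int)) = ((i + j : Nat) : Int) := by push_cast; ring
    rw [hcast, PySem.List.pyGet?_natCast, PySem.List.pyGet?_natCast] at this
    rw [List.getElem?_drop, this, List.getElem?_eq_getElem hj]
  · intro hpre
    have hall : ∀ k ∈ PySem.List.pyRange 0 (s2.length : Int) 1,
        (PySem.List.pyGet? s1 ((i : Int) + k) == PySem.List.pyGet? s2 k) = true := by
      intro k hk
      obtain ⟨hk0, hk1⟩ := PySem.List.mem_pyRange_one.mp hk
      have hkj : k = ((k.toNat : Nat) : Int) := by omega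
      have hjlt : k.toNat < s2.length := by omega
      rw [hkj]
      have hcast : ((i : Int) + ((k.toNat : Nat) : Int)) = ((i + k.toNat : Nat) : Int) := by
        push_cast; ring
      rw [hcast, PySem.List.pyGet?_natCast, PySem.List.pyGet?_natCast, beq_iff_eq]
      have := (List.prefix_iff_getElem?.mp hpre) k.toNat hjlt
      rw [List.getElem?_drop] at this
      rw [this, List.getElem?_eq_getElem hjlt]
    have := List.countP_eq_length.mpr hall
    rw [hlen] at this
    omega

/-- The slice test of B's pass 1 holds exactly when `s2` occurs at position `j`. -/
theorem slice_test_iff (s1 s2 : List Char) (j : Nat) (hle : j + s2.length ≤ s1.length) :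
    (PySem.List.slice s1 (some (j : Int)) (some ((j : Int) + (s2.length : Int))) == s2) = true
      ↔ s2 <+: s1.drop j := by
  rw [PySem.List.slice_natCast_add, beq_iff_eq]
  constructor
  · intro h
    exact h ▸ List.take_prefix _ _
  · intro h
    have hl : s2.length ≤ (s1.drop j).length := by simp [List.length_drop]; omega
    exact (List.prefix_iff_eq_take.mp h).symm
  -- note: prefix_iff_eq_take : l₁ <+: l₂ ↔ l₁ = l₂.take l₁.length

/-- Elements below the initial threshold are always skipped by the greedy fold
    (`nxt` never decreases), so pre-filtering by the threshold changes nothing. -/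
theorem gfold_filter (M : Int) :
    ∀ (l : List Int) (st : Int × Int) (t : Int), 1 ≤ M → t ≤ st.2 →
      (l.filter (fun p => decide (t ≤ p))).foldl (typingAltStep M) st
        = l.foldl (typingAltStep M) st := by
  intro l
  induction l with
  | nil => intro st t _ _; rfl
  | cons p l ih =>
    intro st t hM ht
    by_cases hp : t ≤ p
    · rw [List.filter_cons_of_pos (by simpa using hp)]
      simp only [List.foldl_cons]
      by_cases hs : st.2 ≤ p
      · rw [show typingAltStep M st p = (st.1 + 1, p + M) from by simp [typingAltStep, hs]]
        exact ih _ t hM (by simp; omega)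
      · rw [show typingAltStep M st p = st from by simp [typingAltStep, hs]]
        exact ih _ t hM ht
    · rw [List.filter_cons_of_neg (by simpa using hp)]
      simp only [List.foldl_cons]
      rw [show typingAltStep M st p = st from by
        simp only [typingAltStep, if_neg (show ¬ st.2 ≤ p by omega)]]
      exact ih _ t hM ht

/-- The `taken` counter of the greedy fold is additive in its initial value. -/
theorem gfold_add (M : Int) :
    ∀ (l : List Int) (c t : Int),
      l.foldl (typingAltStep M) (c, t)
        = (c + (l.foldl (typingAltStep M) (0, t)).1, (l.foldl (typingAltStep M) (0, t)).2) := by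
  intro l
  induction l with
  | nil => intro c t; simp
  | cons p l ih =>
    intro c t
    simp only [List.foldl_cons]
    by_cases hs : t ≤ p
    · rw [show typingAltStep M (c, t) p = (c + 1, p + M) from by simp [typingAltStep, hs],
          show typingAltStep M (0, t) p = (0 + 1, p + M) from by simp [typingAltStep, hs]]
      rw [ih (c+1) (p+M), ih (0+1) (p+M)]
      simp only [Prod.mk.injEq]
      exact ⟨by ring, trivial⟩
    · rw [show typingAltStep M (c, t) p = (c, t) from by simp [typingAltStep, hs],
          show typingAltStep M (0, t) p = (0, t) from by simp [typingAltStep, hs]]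
      exact ih c t
  -- (the second call to ih normalises the (0+1) start)

/-- If every element clears both thresholds, the initial threshold does not affect `taken`. -/
theorem gfold_fst_congr (M : Int) (l : List Int) (t t' : Int)
    (h : ∀ p ∈ l, t ≤ p ∧ t' ≤ p) :
    (l.foldl (typingAltStep M) (0, t)).1 = (l.foldl (typingAltStep M) (0, t')).1 := by
  cases l with
  | nil => rfl
  | cons p l =>
    have hp := h p (by simp)
    simp only [List.foldl_cons]
    rw [show typingAltStep M (0, t) p = (0 + 1, p + M) from by simp [typingAltStep, hp.1],
        show typingAltStep M (0, t') p = (0 + 1, p + M) from by simp [typingAltStep, hp.2]]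

/-- Occurrence test used by B's pass 1, as a Bool predicate on the position. -/
def occTest (s1 s2 : List Char) (p : Int) : Bool :=
  PySem.List.slice s1 (some p) (some (p + (s2.length : Int))) == s2

/-- Main invariant: A's fused loop from position `i` equals `r` minus `(M-1)` per greedy
    non-overlapping occurrence among ALL occurrences at positions `≥ i`. -/
theorem typing_main (s1 s2 : List Char) (hM : s2 ≠ []) :
    ∀ (fuel : Nat) (i : Nat) (r : Int), i ≤ s1.length → s1.length + 1 ≤ fuel + i →
      typingLoop s1 s2 (s1.length : Int) (s2.length : Int) fuel (i : Int) r
        = r - (((PySem.List.pyRange (i : Int) ((s1.length : Int) - (s2.length : Int) + 1) 1).filter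
              (occTest s1 s2)).foldl (typingAltStep (s2.length : Int)) (0, (i : Int))).1
            * ((s2.length : Int) - 1) := by
  have hM1 : 0 < s2.length := List.length_pos_iff.mpr (by simpa using hM)
  intro fuel
  induction fuel with
  | zero => intro i r hi hf; exact absurd hf (by omega)
  | succ fuel ih =>
    intro i r hi hf
    by_cases hcond : (i : Int) ≤ (s1.length : Int) - (s2.length : Int)
    · -- i is a candidate position
      have hle : i + s2.length ≤ s1.length := by omega
      have hcons : PySem.List.pyRange (i : Int) ((s1.length : Int) - (s2.length : Int) + 1) 1
          = (i : Int) :: PySem.List.pyRange ((i : Int) + 1) ((s1.length : Int) - (s2.length : Int) + 1) 1 :=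
        PySem.List.pyRange_one_cons (by omega)
      by_cases hpre : s2 <+: s1.drop i
      · -- a match at i
        have htest : occTest s1 s2 (i : Int) = true := by
          unfold occTest; exact (slice_test_iff s1 s2 i hle).mpr hpre
        have hcnt := (cnt_eq_iff s1 s2 i hle).mpr hpre
        simp only [typingLoop]
        rw [if_pos hcond, if_pos hcnt]
        rw [show ((i : Int) + (s2.length : Int)) = ((i + s2.length : Nat) : Int) by push_cast; ring]
        rw [ih (i + s2.length) (r - (s2.length : Int) + 1) (by omega) (by omega)]
        rw [hcons, List.filter_cons_of_pos htest, List.foldl_cons]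
        rw [show typingAltStep (s2.length : Int) (0, (i : Int)) (i : Int)
              = (0 + 1, ((i + s2.length : Nat) : Int)) from by
            unfold typingAltStep; simp]
        rw [gfold_add (s2.length : Int) _ (0 + 1) ((i + s2.length : Nat) : Int)]
        -- relate the fold over positions ≥ i+1 with the fold over positions ≥ i+M
        have hfe : (PySem.List.pyRange ((i + s2.length : Nat) : Int) ((s1.length : Int) - (s2.length : Int) + 1) 1).filter
              (occTest s1 s2)
            = ((PySem.List.pyRange ((i : Int) + 1) ((s1.length : Int) - (s2.length : Int) + 1) 1).filter
              (occTest s1 s2)).filter (fun p => decide (((i + s2.length : Nat) : Int) ≤ p)) := by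
          by_cases h : (((i + s2.length : Nat) : Int)) ≤ (s1.length : Int) - (s2.length : Int) + 1
          · rw [PySem.List.pyRange_one_append ((i : Int) + 1) ((i + s2.length : Nat) : Int)
                  ((s1.length : Int) - (s2.length : Int) + 1) (by push_cast; omega) h]
            rw [List.filter_append, List.filter_append]
            have h1 : ((PySem.List.pyRange ((i : Int) + 1) ((i + s2.length : Nat) : Int) 1).filter
                (occTest s1 s2)).filter (fun p => decide (((i + s2.length : Nat) : Int) ≤ p)) = [] := by
              rw [List.filter_eq_nil_iff]
              intro p hp
              have hp2 := (PySem.List.mem_pyRange_one.mp (List.mem_of_mem_filter hp)).2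
              simp only [decide_eq_true_eq]
              omega
            have h2 : ((PySem.List.pyRange ((i + s2.length : Nat) : Int)
                  ((s1.length : Int) - (s2.length : Int) + 1) 1).filter
                (occTest s1 s2)).filter (fun p => decide (((i + s2.length : Nat) : Int) ≤ p))
                = (PySem.List.pyRange ((i + s2.length : Nat) : Int)
                  ((s1.length : Int) - (s2.length : Int) + 1) 1).filter (occTest s1 s2) := by
              rw [List.filter_eq_self]
              intro p hp
              have hp1 := (PySem.List.mem_pyRange_one.mp (List.mem_of_mem_filter hp)).1
              simp only [decide_eq_true_eq]
              omega
            rw [h1, h2, List.nil_append]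
          · rw [PySem.List.pyRange_one_eq_nil (by omega), List.filter_nil]
            symm
            rw [List.filter_eq_nil_iff]
            intro p hp
            have hp2 := (PySem.List.mem_pyRange_one.mp (List.mem_of_mem_filter hp)).2
            simp only [decide_eq_true_eq]
            omega
        rw [hfe, gfold_filter (s2.length : Int) _ _ _ (by omega) (by simp)]
        ring
      · -- no match at i
        have htest : occTest s1 s2 (i : Int) = false := by
          unfold occTest
          rcases Bool.eq_false_or_eq_true (PySem.List.slice s1 (some (i : Int))
              (some ((i : Int) + (s2.length : Int))) == s2) with h | h
          · exact absurd ((slice_test_iff s1 s2 i hle).mp h) hpre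
          · exact h
        have hcnt : ¬ ((PySem.List.pyRange 0 ((s2.length : Int)) 1).foldl
            (fun cnt k => if PySem.List.pyGet? s1 ((i : Int) + k) == PySem.List.pyGet? s2 k then cnt + 1 else cnt)
            (0 : Int) = (s2.length : Int)) := fun h => hpre ((cnt_eq_iff s1 s2 i hle).mp h)
        simp only [typingLoop]
        rw [if_pos hcond, if_neg hcnt]
        rw [show ((i : Int) + 1) = ((i + 1 : Nat) : Int) by push_cast; ring]
        rw [ih (i + 1) r (by omega) (by omega)]
        rw [hcons, List.filter_cons_of_neg (by simp [htest])]
        have := gfold_fst_congr (s2.length : Int)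
          ((PySem.List.pyRange ((i + 1 : Nat) : Int) ((s1.length : Int) - (s2.length : Int) + 1) 1).filter
            (occTest s1 s2)) ((i : Int)) ((i + 1 : Nat) : Int)
          (by
            intro p hp
            have := (PySem.List.mem_pyRange_one.mp (List.mem_of_mem_filter hp)).1
            constructor <;> push_cast at this ⊢ <;> omega)
        rw [show ((i : Int) + 1) = ((i + 1 : Nat) : Int) by push_cast; ring, this]
    · -- i past the last candidate position: no occurrences remain
      simp only [typingLoop]
      rw [if_neg hcond, PySem.List.pyRange_one_eq_nil (by omega), List.filter_nil]
      simp

-- ===== VERDICT =====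
theorem typing_spec : Claim_equal_typing := by
  intro str1 str2 _ hpre
  unfold Spec_typing typing typing_alt
  have hM : str2.toList ≠ [] := by
    intro h; exact hpre (by simpa using h)
  have hmain := typing_main str1.toList str2.toList hM (str1.toList.length + 1) 0
    (str1.toList.length : Int) (Nat.zero_le _) (by omega)
  simpa [PySem.Chars.len, occTest] using hmain
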